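-- pv_equiv track=rewrite | github.com/bjornwictorin/aoc2024 | day10/topological2.py | find_summits
-- ===== SOURCE A (Python) =====
-- def find_summits(row, col, map):
--     map_width = len(map[0])
--     map_height = len(map)
--     assert 0 <= row < map_height, "illegal row"
--     assert 0 <= col < map_width, "illegal col"
--     height = map[row][col]
--     if height == 9:
--         return [(row, col)]
--     reachable_summits = []
--     # check above
--     if row > 0 and map[row - 1][col] == height + 1:
--         reachable_summits.extend(find_summits(row - 1, col, map))
--     # check to the right
--     if col < map_width - 1 and map[row][col + 1] == height + 1:
--         reachable_summits.extend(find_summits(row, col + 1, map))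
--     # check below
--     if row < map_height - 1 and map[row + 1][col] == height + 1:
--         reachable_summits.extend(find_summits(row + 1, col, map))
--     # check to the left
--     if col > 0 and map[row][col - 1] == height + 1:
--         reachable_summits.extend(find_summits(row, col - 1, map))
--     return reachable_summits
-- ===== SOURCE B (Python) =====
-- def find_summits(row, col, map):
--     map_width = len(map[0])
--     map_height = len(map)
--     assert 0 <= row < map_height, "illegal row"
--     assert 0 <= col < map_width, "illegal col"
--     stack = [(row, col)]
--     result = []
--     while stack:
--         r, c = stack.pop()
--         height = map[r][c]
--         if height == 9:
--             result.append((r, c))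
--             continue
--         neighbors = []
--         if r > 0 and map[r - 1][c] == height + 1:
--             neighbors.append((r - 1, c))
--         if c < map_width - 1 and map[r][c + 1] == height + 1:
--             neighbors.append((r, c + 1))
--         if r < map_height - 1 and map[r + 1][c] == height + 1:
--             neighbors.append((r + 1, c))
--         if c > 0 and map[r][c - 1] == height + 1:
--             neighbors.append((r, c - 1))
--         stack.extend(reversed(neighbors))
--     return result
-- ===== Notes on version B (the rewrite author's own statement) =====
-- stated objective: alternative
-- what changed: Replaced A's recursive DFS (recursion at each strictly-+1 neighbor, concatenating result lists) with an iterative DFS over an explicit stack and a single result accumulator, pushing neighbors in reverse so the pop order reproduces A's preorder exactly.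
-- outside the precondition, e.g. on find_summits(0, 0, [[9], [1, 2]]): A returns [(0, 0)], B returns [(0, 0)]
import Mathlib
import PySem

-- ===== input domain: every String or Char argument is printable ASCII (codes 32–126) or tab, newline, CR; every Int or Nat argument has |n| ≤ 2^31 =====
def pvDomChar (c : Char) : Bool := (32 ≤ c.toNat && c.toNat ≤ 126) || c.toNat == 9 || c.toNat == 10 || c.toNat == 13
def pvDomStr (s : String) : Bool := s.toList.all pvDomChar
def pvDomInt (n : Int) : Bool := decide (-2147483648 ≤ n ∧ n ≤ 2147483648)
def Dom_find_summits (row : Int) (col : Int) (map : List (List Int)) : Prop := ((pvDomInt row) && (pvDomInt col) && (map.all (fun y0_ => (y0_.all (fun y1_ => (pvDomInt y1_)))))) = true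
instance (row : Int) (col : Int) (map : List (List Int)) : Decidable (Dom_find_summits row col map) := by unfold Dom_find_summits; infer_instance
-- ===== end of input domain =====

-- B replaces A's recursive DFS by an iterative explicit-stack DFS (neighbors pushed in
-- reverse so pops reproduce A's preorder); objective: alternative decomposition, same cost.


-- ===== PORT A =====
-- `map[r][c]` for the in-range nonnegative indices both programs use (Pre_ and the
-- traversal guards keep every access in range, so getD with toNat is exact here).
def pvIdx (map : List (List Int)) (r c : Int) : Int :=
  (map.getD r.toNat []).getD c.toNat 0

-- an upper bound on every value pvIdx can return (used only for termination)
def pvMaxV (map : List (List Int)) : Int := map.flatten.foldr max 0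

theorem pv_le_foldr_max (l : List Int) (x : Int) (hx : x ∈ l) : x ≤ l.foldr max 0 := by
  induction l with
  | nil => cases hx
  | cons a t ih =>
    rcases List.mem_cons.mp hx with h | h
    · simp [h]
    · simp only [List.foldr_cons, le_max_iff]; exact Or.inr (ih h)

theorem pv_foldr_max_nonneg (l : List Int) : 0 ≤ l.foldr max 0 := by
  induction l with
  | nil => simp
  | cons a t ih => simp only [List.foldr_cons, le_max_iff]; exact Or.inr ih

theorem pvIdx_le (map : List (List Int)) (r c : Int) : pvIdx map r c ≤ pvMaxV map := by
  unfold pvIdx pvMaxV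
  rcases h1 : map[r.toNat]? with _ | row
  · simp [List.getD, h1, pv_foldr_max_nonneg]
  · rcases h2 : row[c.toNat]? with _ | v
    · simp [List.getD, h1, h2, pv_foldr_max_nonneg]
    · have hrow : row ∈ map := List.mem_of_getElem? h1
      have hv : v ∈ row := List.mem_of_getElem? h2
      have : v ∈ map.flatten := List.mem_flatten.mpr ⟨row, hrow, hv⟩
      simp only [List.getD, h1, h2, Option.getD_some]
      exact pv_le_foldr_max _ _ this

-- recursive DFS body of A (the entry asserts are checked once in find_summits;
-- inside the recursion they always hold, exactly as in the Python)
def goA (map : List (List Int)) (w h : Int) (row col : Int) : List (Int × Int) :=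
  if pvIdx map row col = 9 then [(row, col)]
  else
    (if hu : 0 < row ∧ pvIdx map (row - 1) col = pvIdx map row col + 1 then
        goA map w h (row - 1) col else []) ++
    (if hr : col < w - 1 ∧ pvIdx map row (col + 1) = pvIdx map row col + 1 then
        goA map w h row (col + 1) else []) ++
    (if hd : row < h - 1 ∧ pvIdx map (row + 1) col = pvIdx map row col + 1 then
        goA map w h (row + 1) col else []) ++
    (if hl : 0 < col ∧ pvIdx map row (col - 1) = pvIdx map row col + 1 then
        goA map w h row (col - 1) else [])
termination_by (pvMaxV map + 2 - pvIdx map row col).toNat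
decreasing_by
  · have h1 := pvIdx_le map (row - 1) col; omega
  · have h1 := pvIdx_le map row (col + 1); omega
  · have h1 := pvIdx_le map (row + 1) col; omega
  · have h1 := pvIdx_le map row (col - 1); omega

def find_summits (row : Int) (col : Int) (map : List (List Int)) : List (Int × Int) :=
  let w : Int := (map.headD []).length
  let h : Int := map.length
  -- Python asserts (and map[0] on an empty map) raise outside these bounds: Pre_ excludes that
  if 0 ≤ row ∧ row < h ∧ 0 ≤ col ∧ col < w then goA map w h row col else []

-- ===== PORT B =====
-- the neighbor list B builds before extending the stack (above, right, below, left)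
def pvNbrs (map : List (List Int)) (w h : Int) (row col : Int) : List (Int × Int) :=
  (if 0 < row ∧ pvIdx map (row - 1) col = pvIdx map row col + 1 then [(row - 1, col)] else []) ++
  (if col < w - 1 ∧ pvIdx map row (col + 1) = pvIdx map row col + 1 then [(row, col + 1)] else []) ++
  (if row < h - 1 ∧ pvIdx map (row + 1) col = pvIdx map row col + 1 then [(row + 1, col)] else []) ++
  (if 0 < col ∧ pvIdx map row (col - 1) = pvIdx map row col + 1 then [(row, col - 1)] else [])

theorem pvNbrs_idx (map : List (List Int)) (w h : Int) (row col : Int)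
    (p : Int × Int) (hp : p ∈ pvNbrs map w h row col) :
    pvIdx map p.1 p.2 = pvIdx map row col + 1 := by
  simp only [pvNbrs, List.mem_append, List.mem_ite_nil_right, List.mem_singleton] at hp
  rcases hp with ((⟨h1, h2⟩ | ⟨h1, h2⟩) | ⟨h1, h2⟩) | ⟨h1, h2⟩ <;> rw [h2] <;> exact h1.2

theorem pvNbrs_len (map : List (List Int)) (w h : Int) (row col : Int) :
    (pvNbrs map w h row col).length ≤ 4 := by
  unfold pvNbrs; split_ifs <;> simp

-- termination measure for the worklist: sum of 5^(distance of the cell's height from the top)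
def pvMeas (map : List (List Int)) (stack : List (Int × Int)) : Nat :=
  (stack.map (fun p => 5 ^ (pvMaxV map + 2 - pvIdx map p.1 p.2).toNat)).sum

theorem pvMeas_nbrs_lt (map : List (List Int)) (w h : Int) (row col : Int)
    (rest : List (Int × Int)) :
    pvMeas map (pvNbrs map w h row col ++ rest) < pvMeas map ((row, col) :: rest) := by
  have hb := pvIdx_le map row col
  set k : Nat := (pvMaxV map + 2 - pvIdx map row col).toNat with hk
  have hk2 : 2 ≤ k := by omega
  have hns : ∀ p ∈ pvNbrs map w h row col,
      (5 : Nat) ^ (pvMaxV map + 2 - pvIdx map p.1 p.2).toNat = 5 ^ (k - 1) := by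
    intro p hp
    have h1 := pvNbrs_idx map w h row col p hp
    congr 1; omega
  have hsum : ((pvNbrs map w h row col).map
      (fun p => 5 ^ (pvMaxV map + 2 - pvIdx map p.1 p.2).toNat)).sum ≤ 4 * 5 ^ (k - 1) := by
    have hlen := pvNbrs_len map w h row col
    calc ((pvNbrs map w h row col).map
            (fun p => 5 ^ (pvMaxV map + 2 - pvIdx map p.1 p.2).toNat)).sum
        = ((pvNbrs map w h row col).map (fun _ => 5 ^ (k - 1))).sum := by
          apply congrArg; exact List.map_congr_left hns
      _ = (pvNbrs map w h row col).length * 5 ^ (k - 1) := by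
          rw [List.map_const', List.sum_replicate, smul_eq_mul]
      _ ≤ 4 * 5 ^ (k - 1) := Nat.mul_le_mul_right _ hlen
  have hpow : 4 * 5 ^ (k - 1) < 5 ^ k := by
    have : (5 : Nat) ^ k = 5 ^ (k - 1) * 5 := by
      rw [← pow_succ]; congr 1; omega
    have hpos : 0 < (5 : Nat) ^ (k - 1) := Nat.pow_pos (by norm_num)
    omega
  unfold pvMeas
  rw [List.map_append, List.sum_append, List.map_cons, List.sum_cons]
  have h5 : (5 : Nat) ^ (pvMaxV map + 2 - pvIdx map (row, col).1 (row, col).2).toNat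
      = 5 ^ k := rfl
  rw [h5]
  omega

theorem pvMeas_pop_lt (map : List (List Int)) (row col : Int) (rest : List (Int × Int)) :
    pvMeas map rest < pvMeas map ((row, col) :: rest) := by
  unfold pvMeas
  rw [List.map_cons, List.sum_cons]
  have : 0 < (5 : Nat) ^ (pvMaxV map + 2 - pvIdx map (row, col).1 (row, col).2).toNat :=
    Nat.pow_pos (by norm_num)
  omega

-- the while loop of B: pop, collect 9s, else push the neighbors (reversed, so popped in order)
def goB (map : List (List Int)) (w h : Int) (stack : List (Int × Int))
    (acc : List (Int × Int)) : List (Int × Int) :=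
  match stack with
  | [] => acc
  | (row, col) :: rest =>
    if pvIdx map row col = 9 then goB map w h rest (acc ++ [(row, col)])
    else goB map w h (pvNbrs map w h row col ++ rest) acc
termination_by pvMeas map stack
decreasing_by
  · exact pvMeas_pop_lt map row col rest
  · exact pvMeas_nbrs_lt map w h row col rest

def find_summits_alt (row : Int) (col : Int) (map : List (List Int)) : List (Int × Int) :=
  let w : Int := (map.headD []).length
  let h : Int := map.length
  if 0 ≤ row ∧ row < h ∧ 0 ≤ col ∧ col < w then goB map w h [(row, col)] [] else []

-- ===== PRECONDITION & SPEC =====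
-- Pre_ excludes inputs where Python A raises: empty map (IndexError on map[0]), out-of-bounds
-- start (AssertionError), and non-rectangular maps (reachable short rows raise IndexError);
-- on some ragged maps the short rows are never reached and A still returns — those are
-- excluded too, and B returns the same value there.
def Pre_find_summits (row : Int) (col : Int) (map : List (List Int)) : Prop :=
  map ≠ [] ∧ (∀ r ∈ map, (r.length : Int) = ((map.headD []).length : Int)) ∧
  0 ≤ row ∧ row < (map.length : Int) ∧ 0 ≤ col ∧ col < ((map.headD []).length : Int)
instance (row : Int) (col : Int) (map : List (List Int)) : Decidable (Pre_find_summits row col map) := by unfold Pre_find_summits; infer_instance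

def pvWitness_find_summits : Int × Int × List (List Int) := (0, 0, [[8, 9]])

def Spec_find_summits (row : Int) (col : Int) (map : List (List Int)) (out : List (Int × Int)) : Prop := out = find_summits_alt row col map
instance (row : Int) (col : Int) (map : List (List Int)) (out : List (Int × Int)) : Decidable (Spec_find_summits row col map out) := by unfold Spec_find_summits; infer_instance

-- ===== CLAIM (what is proved, stated in full; the proofs are below) =====
def Claim_equal_find_summits : Prop := ∀ (row : Int) (col : Int) (map : List (List Int)), Dom_find_summits row col map → Pre_find_summits row col map → Spec_find_summits row col map (find_summits row col map)

-- ===== LEMMAS AND PROOFS =====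

-- one unfolding of A's recursion, phrased through B's neighbor list
theorem goA_eq_nbrs (map : List (List Int)) (w h : Int) (row col : Int) :
    goA map w h row col =
      if pvIdx map row col = 9 then [(row, col)]
      else (pvNbrs map w h row col).flatMap (fun p => goA map w h p.1 p.2) := by
  rw [goA]
  by_cases h9 : pvIdx map row col = 9
  · simp [h9]
  · simp only [h9, if_false]
    unfold pvNbrs
    split_ifs <;> simp

-- loop invariant: the worklist loop computes acc ++ the concatenated recursive results
theorem goB_eq (map : List (List Int)) (w h : Int) :
    ∀ (stack acc : List (Int × Int)),
      goB map w h stack acc = acc ++ stack.flatMap (fun p => goA map w h p.1 p.2) := by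
  intro stack acc
  induction stack, acc using goB.induct map w h with
  | case1 acc => simp [goB]
  | case2 acc row col rest h9 ih =>
    rw [goB]; simp only [h9, if_true]
    rw [ih, List.flatMap_cons, goA_eq_nbrs map w h row col]
    simp [h9]
  | case3 acc row col rest h9 ih =>
    rw [goB]; simp only [h9, if_false]
    rw [ih, List.flatMap_cons, goA_eq_nbrs map w h row col]
    simp [h9, List.flatMap_append]

-- ===== VERDICT (by name: the statement is the Claim_ definition above) =====
theorem find_summits_spec : Claim_equal_find_summits := by
  intro row col map _ _
  unfold Spec_find_summits find_summits find_summits_alt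
  by_cases hb : 0 ≤ row ∧ row < (map.length : Int) ∧ 0 ≤ col ∧ col < (((map.headD []).length : Int))
  · simp only [hb]
    rw [goB_eq]
    simp
  · simp only [hb, if_false]
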